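-- pv_equiv track=rewrite | github.com/johnathanlouie/album-summarizer | hybridcluster.py | _next_lowest
-- ===== SOURCE A (Python) =====
-- from typing import List
--
-- def _next_lowest(min_: int, clusters: List[int]) -> int:
--     """
--     Returns the lowest integer from the list of integers no lower than the given minimum.
--     Returns none if there is no integer greater or equal to the minimum.
--     """
--     lowest = None
--     for i in clusters:
--         if lowest == None:
--             if min_ <= i:
--                 lowest = i
--         elif min_ <= i <= lowest:
--             lowest = i
--     return lowest
-- ===== SOURCE B (Python) =====
-- def _next_lowest(min_, clusters):
--     cands = [i for i in clusters if i >= min_]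
--     return min(cands) if cands else None
-- ===== Notes on version B (the rewrite author's own statement) =====
-- stated objective: simpler
-- what changed: Replaces A's single running-min accumulator loop with a case analysis over None by a two-stage filter-then-reduce: select the elements >= min_, then take min with None on empty.
import Mathlib
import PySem

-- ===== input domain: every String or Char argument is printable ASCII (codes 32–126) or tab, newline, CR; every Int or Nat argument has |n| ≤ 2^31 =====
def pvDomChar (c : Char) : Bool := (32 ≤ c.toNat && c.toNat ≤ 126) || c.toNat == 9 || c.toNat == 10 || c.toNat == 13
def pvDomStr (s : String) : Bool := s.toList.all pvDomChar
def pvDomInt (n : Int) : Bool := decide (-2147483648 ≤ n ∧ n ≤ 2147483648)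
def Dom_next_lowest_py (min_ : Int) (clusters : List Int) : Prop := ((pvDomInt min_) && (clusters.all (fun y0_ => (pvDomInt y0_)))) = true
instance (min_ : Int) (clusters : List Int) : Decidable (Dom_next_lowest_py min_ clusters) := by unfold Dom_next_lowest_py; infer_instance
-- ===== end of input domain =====

-- B replaces A's running-min accumulator loop with filter-then-min (simpler decomposition).

-- ===== PORT A =====
def next_lowest_py (min_ : Int) (clusters : List Int) : Option Int :=
  clusters.foldl (fun lowest i =>
    match lowest with
    | none => if min_ ≤ i then some i else lowest
    | some l => if min_ ≤ i ∧ i ≤ l then some i else lowest) none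

-- ===== PORT B =====
def next_lowest_py_alt (min_ : Int) (clusters : List Int) : Option Int :=
  let cands := clusters.filter (fun i => decide (min_ ≤ i))
  if cands.isEmpty then none else PySem.List.min? cands (fun x => x)

-- ===== PRECONDITION & SPEC =====
def Spec_next_lowest_py (min_ : Int) (clusters : List Int) (out : Option Int) : Prop := out = next_lowest_py_alt min_ clusters
instance (min_ : Int) (clusters : List Int) (out : Option Int) : Decidable (Spec_next_lowest_py min_ clusters out) := by unfold Spec_next_lowest_py; infer_instance

-- ===== CLAIM (what is proved, stated in full; the proofs are below) =====
def Claim_equal_next_lowest_py : Prop := ∀ (min_ : Int) (clusters : List Int), Dom_next_lowest_py min_ clusters → Spec_next_lowest_py min_ clusters (next_lowest_py min_ clusters)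

-- ===== LEMMAS AND PROOFS =====

-- Once the accumulator holds some l, A's loop computes the running min of l and the kept elements.
theorem nl_loop_some (min_ l : Int) (xs : List Int) :
    xs.foldl (fun lowest i =>
      match lowest with
      | none => if min_ ≤ i then some i else lowest
      | some l => if min_ ≤ i ∧ i ≤ l then some i else lowest) (some l)
    = some ((xs.filter (fun i => decide (min_ ≤ i))).foldl min l) := by
  induction xs generalizing l with
  | nil => simp
  | cons i t ih =>
    simp only [List.foldl_cons, List.filter_cons]
    by_cases h : min_ ≤ i
    · by_cases h2 : i ≤ l
      · simp [h, h2, ih]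
      · simp [h, h2, ih, min_eq_left (show l ≤ i by omega)]
    · simp [h, ih]

theorem nl_main (min_ : Int) (clusters : List Int) :
    next_lowest_py min_ clusters = next_lowest_py_alt min_ clusters := by
  induction clusters with
  | nil => rfl
  | cons i t ih =>
    simp only [next_lowest_py, next_lowest_py_alt, List.foldl_cons, List.filter_cons] at *
    by_cases h : min_ ≤ i
    · simp [h, nl_loop_some, PySem.List.min?_id_cons]
    · simpa [h] using ih

-- ===== VERDICT (by name: the statement is the Claim_ definition above) =====
theorem next_lowest_py_spec : Claim_equal_next_lowest_py := by
  intro min_ clusters _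
  unfold Spec_next_lowest_py
  exact nl_main min_ clusters
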